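-- pv_equiv track=rewrite | github.com/dtunkelang/y2karaoke | src/y2karaoke/core/visual/reconstruction_sequencing.py | tokens_contiguous_subphrase
-- ===== SOURCE A (Python) =====
-- def tokens_contiguous_subphrase(needle: list[str], haystack: list[str]) -> bool:
--     if not needle or len(needle) > len(haystack):
--         return False
--     n = len(needle)
--     for idx in range(0, len(haystack) - n + 1):
--         if haystack[idx : idx + n] == needle:
--             return True
--     return False
-- ===== SOURCE B (Python) =====
-- def tokens_contiguous_subphrase(needle: list[str], haystack: list[str]) -> bool:
--     # NFA simulation of the pattern-matching automaton: one left-to-right pass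
--     # over haystack, maintaining the set of active partial-match lengths
--     # (lengths j with needle[:j] a suffix of the tokens scanned so far).
--     n = len(needle)
--     if n == 0:
--         return False
--     states = []  # distinct lengths j, 0 < j < n
--     for tok in haystack:
--         new = []
--         for j in [0] + states:
--             if needle[j] == tok:
--                 if j + 1 == n:
--                     return True
--                 new.append(j + 1)
--         states = new
--     return False
-- ===== Notes on version B (the rewrite author's own statement) =====
-- stated objective: alternative
-- what changed: Replaces the per-position window/slice comparison by a single left-to-right pass over haystack that simulates the pattern-matching NFA, maintaining the set of active partial-match lengths; no slices and no window restarts.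
import Mathlib
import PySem

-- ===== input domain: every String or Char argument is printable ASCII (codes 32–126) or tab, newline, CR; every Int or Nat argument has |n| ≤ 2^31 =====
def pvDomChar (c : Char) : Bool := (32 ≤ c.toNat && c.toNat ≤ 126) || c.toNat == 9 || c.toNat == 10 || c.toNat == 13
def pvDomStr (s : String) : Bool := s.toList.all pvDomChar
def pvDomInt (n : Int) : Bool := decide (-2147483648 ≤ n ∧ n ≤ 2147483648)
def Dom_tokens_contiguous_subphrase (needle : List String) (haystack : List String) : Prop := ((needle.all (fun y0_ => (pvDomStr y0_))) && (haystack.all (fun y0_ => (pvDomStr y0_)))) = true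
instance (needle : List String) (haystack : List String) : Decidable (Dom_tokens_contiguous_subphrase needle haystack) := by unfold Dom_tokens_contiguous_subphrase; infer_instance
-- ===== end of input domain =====

-- B replaces A's per-position window/slice comparison by a single left-to-right
-- pass over haystack simulating the pattern-matching NFA (the set of active
-- partial-match lengths); alternative algorithm, same worst-case cost.

-- ===== PORT A =====
-- the 'for idx in range(...)' loop with its early return, as recursion over the index list
def pvALoop (needle haystack : List String) : List Int → Bool
  | [] => false
  | idx :: rest =>
    if PySem.List.slice haystack (some idx) (some (idx + (needle.length : Int))) = needle then true
    else pvALoop needle haystack rest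

def tokens_contiguous_subphrase (needle : List String) (haystack : List String) : Bool :=
  if needle.isEmpty || haystack.length < needle.length then false
  else pvALoop needle haystack
    (PySem.List.pyRange 0 ((haystack.length : Int) - (needle.length : Int) + 1) 1)

-- ===== PORT B =====
-- the inner 'for j in [0] + states' loop of one haystack token: 'none' = the
-- Python 'return True' fired, 'some new' = the next states list
def pvStep (needle : List String) (n : Nat) (tok : String) : List Nat → List Nat → Option (List Nat)
  | [], new => some new
  | j :: rest, new =>
    if PySem.List.pyGetD needle (j : Int) "" = tok then
      if j + 1 = n then none
      else pvStep needle n tok rest (new ++ [j + 1])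
    else pvStep needle n tok rest new

-- the outer 'for tok in haystack' loop carrying the states list
def pvScan (needle : List String) (n : Nat) : List String → List Nat → Bool
  | [], _ => false
  | tok :: hs, states =>
    match pvStep needle n tok (0 :: states) [] with
    | none => true
    | some new => pvScan needle n hs new

def tokens_contiguous_subphrase_alt (needle : List String) (haystack : List String) : Bool :=
  if needle.length = 0 then false
  else pvScan needle needle.length haystack []

-- ===== PRECONDITION & SPEC =====
def Spec_tokens_contiguous_subphrase (needle : List String) (haystack : List String) (out : Bool) : Prop := out = tokens_contiguous_subphrase_alt needle haystack
instance (needle : List String) (haystack : List String) (out : Bool) : Decidable (Spec_tokens_contiguous_subphrase needle haystack out) := by unfold Spec_tokens_contiguous_subphrase; infer_instance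

-- ===== CLAIM (what is proved, stated in full; the proofs are below) =====
def Claim_equal_tokens_contiguous_subphrase : Prop := ∀ (needle : List String) (haystack : List String), Dom_tokens_contiguous_subphrase needle haystack → Spec_tokens_contiguous_subphrase needle haystack (tokens_contiguous_subphrase needle haystack)

-- ===== LEMMAS AND PROOFS =====

-- ---- A-side: A = true ↔ needle ≠ [] ∧ needle infix of haystack ----

theorem window_iff_infix (needle haystack : List String) :
    (∃ p : Nat, p + needle.length ≤ haystack.length ∧
        (haystack.drop p).take needle.length = needle) ↔ needle <:+: haystack := by
  constructor
  · rintro ⟨p, _, h3⟩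
    rw [← h3]
    exact ((List.take_prefix _ _).isInfix).trans (List.drop_suffix p haystack).isInfix
  · rintro ⟨s, t, hst⟩
    have hlen : s.length + needle.length + t.length = haystack.length := by
      rw [← hst, List.length_append, List.length_append]
    refine ⟨s.length, by omega, ?_⟩
    rw [← hst, List.append_assoc, List.drop_left, List.take_left' rfl]

theorem pvALoop_iff (needle haystack : List String) :
    ∀ (stop i : Int), 0 ≤ i →
    (pvALoop needle haystack (PySem.List.pyRange i stop 1) = true ↔
      ∃ j : Nat, (i ≤ (j : Int) ∧ (j : Int) < stop) ∧
        (haystack.drop j).take needle.length = needle) := by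
  intro stop i hi
  by_cases hlt : i < stop
  · generalize hk : (stop - i).toNat = k
    induction k generalizing i with
    | zero => omega
    | succ k ih =>
      rw [PySem.List.pyRange_one_cons hlt]
      simp only [pvALoop]
      have hslice : PySem.List.slice haystack (some i) (some (i + (needle.length : Int)))
          = (haystack.drop i.toNat).take needle.length := by
        rw [PySem.List.slice_toNat haystack hi (by omega)]
        congr 1
        omega
      by_cases hmatch : PySem.List.slice haystack (some i) (some (i + (needle.length : Int))) = needle
      · rw [if_pos hmatch]
        simp only [true_iff]
        refine ⟨i.toNat, ⟨by omega, by omega⟩, ?_⟩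
        rw [← hslice, hmatch]
      · rw [if_neg hmatch]
        by_cases hlt2 : i + 1 < stop
        · rw [ih (i + 1) (by omega) hlt2 (by omega)]
          constructor
          · rintro ⟨j, ⟨h1, h2⟩, h3⟩; exact ⟨j, ⟨by omega, h2⟩, h3⟩
          · rintro ⟨j, ⟨h1, h2⟩, h3⟩
            refine ⟨j, ⟨?_, h2⟩, h3⟩
            rcases eq_or_lt_of_le h1 with heq | hgt
            · exfalso; apply hmatch
              rw [hslice]
              have hj : j = i.toNat := by omega
              rw [hj] at h3
              exact h3
            · omega
        · rw [PySem.List.pyRange_one_eq_nil (by omega)]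
          refine iff_of_false (by simp [pvALoop]) ?_
          rintro ⟨j, ⟨h1, h2⟩, h3⟩
          apply hmatch
          rw [hslice]
          have hj : j = i.toNat := by omega
          rw [hj] at h3
          exact h3
  · rw [PySem.List.pyRange_one_eq_nil (by omega)]
    refine iff_of_false (by simp [pvALoop]) ?_
    rintro ⟨j, ⟨h1, h2⟩, _⟩
    omega

theorem a_iff (needle haystack : List String) :
    tokens_contiguous_subphrase needle haystack = true ↔
      needle ≠ [] ∧ needle <:+: haystack := by
  unfold tokens_contiguous_subphrase
  by_cases h : needle.isEmpty || haystack.length < needle.length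
  · rw [if_pos h]
    simp only [Bool.or_eq_true, List.isEmpty_iff, decide_eq_true_eq] at h
    refine iff_of_false (by simp) ?_
    rintro ⟨hne, hinf⟩
    rcases h with h | h
    · exact hne h
    · exact absurd hinf.length_le (by omega)
  · rw [if_neg h]
    simp only [Bool.or_eq_true, List.isEmpty_iff, decide_eq_true_eq, not_or, not_lt] at h
    obtain ⟨hne, hlen⟩ := h
    rw [pvALoop_iff needle haystack _ 0 le_rfl]
    constructor
    · rintro ⟨j, ⟨_, h2⟩, h3⟩
      exact ⟨hne, (window_iff_infix needle haystack).mp ⟨j, by omega, h3⟩⟩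
    · rintro ⟨_, hinf⟩
      obtain ⟨p, h2, h3⟩ := (window_iff_infix needle haystack).mpr hinf
      exact ⟨p, ⟨by omega, by omega⟩, h3⟩

-- ---- B-side: the NFA-simulation characterisation ----

-- a concatenation is a suffix of a concatenation iff last elements agree and the rest is a suffix
theorem pvConcatSuffix (l p : List String) (a b : String) :
    l ++ [a] <:+ p ++ [b] ↔ (a = b ∧ l <:+ p) := by
  rw [List.suffix_concat_iff]
  constructor
  · rintro (h | ⟨t, h1, h2⟩)
    · simp at h
    · obtain ⟨rfl, h3⟩ := List.append_inj' h1 rfl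
      exact ⟨by simpa using h3, h2⟩
  · rintro ⟨rfl, h⟩
    exact Or.inr ⟨l, rfl, h⟩

-- extending a partial match by one token
theorem take_succ_suffix (needle p : List String) (tok : String) (j : Nat) (hj : j < needle.length) :
    needle.take (j + 1) <:+ p ++ [tok] ↔
      (needle.take j <:+ p ∧ needle.getD j "" = tok) := by
  have htake : needle.take (j + 1) = needle.take j ++ [needle.getD j ""] := by
    rw [List.take_add_one, List.getD_eq_getElem needle "" hj]
    simp [List.getElem?_eq_getElem hj]
  rw [htake, pvConcatSuffix]
  exact ⟨fun ⟨h1, h2⟩ => ⟨h2, h1⟩, fun ⟨h1, h2⟩ => ⟨h2, h1⟩⟩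

theorem pvStep_none_iff (needle : List String) (n : Nat) (tok : String) :
    ∀ (js acc : List Nat),
      (pvStep needle n tok js acc = none ↔
        ∃ j ∈ js, needle.getD j "" = tok ∧ j + 1 = n) := by
  intro js
  induction js with
  | nil => intro acc; simp [pvStep]
  | cons j rest ih =>
    intro acc
    simp only [pvStep]
    by_cases hm : PySem.List.pyGetD needle (j : Int) "" = tok
    · rw [if_pos hm]
      rw [PySem.List.pyGetD_natCast] at hm
      by_cases hn : j + 1 = n
      · rw [if_pos hn]
        simp only [List.mem_cons]
        exact iff_of_true trivial ⟨j, Or.inl rfl, hm, hn⟩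
      · rw [if_neg hn, ih]
        simp only [List.mem_cons]
        constructor
        · rintro ⟨j', h1, h2⟩; exact ⟨j', Or.inr h1, h2⟩
        · rintro ⟨j', h1, h2⟩
          rcases h1 with rfl | h1
          · exact absurd h2.2 hn
          · exact ⟨j', h1, h2⟩
    · rw [if_neg hm, ih]
      rw [PySem.List.pyGetD_natCast] at hm
      simp only [List.mem_cons]
      constructor
      · rintro ⟨j', h1, h2⟩; exact ⟨j', Or.inr h1, h2⟩
      · rintro ⟨j', h1, h2⟩
        rcases h1 with rfl | h1
        · exact absurd h2.1 hm
        · exact ⟨j', h1, h2⟩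

theorem pvStep_some_mem (needle : List String) (n : Nat) (tok : String) :
    ∀ (js acc new : List Nat), pvStep needle n tok js acc = some new →
      ∀ x, (x ∈ new ↔ x ∈ acc ∨ ∃ j ∈ js, needle.getD j "" = tok ∧ j + 1 = x) := by
  intro js
  induction js with
  | nil =>
    intro acc new h x
    simp only [pvStep, Option.some.injEq] at h
    subst h
    simp
  | cons j rest ih =>
    intro acc new h x
    simp only [pvStep] at h
    by_cases hm : PySem.List.pyGetD needle (j : Int) "" = tok
    · rw [if_pos hm] at h
      rw [PySem.List.pyGetD_natCast] at hm
      by_cases hn : j + 1 = n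
      · rw [if_pos hn] at h; exact absurd h (by simp)
      · rw [if_neg hn] at h
        have H := ih _ _ h x
        simp only [List.mem_append, List.mem_cons, List.not_mem_nil, or_false] at H
        rw [H]
        constructor
        · rintro ((hx | hx) | ⟨j', h1, h2, h3⟩)
          · exact Or.inl hx
          · exact Or.inr ⟨j, List.mem_cons_self, hm, hx.symm⟩
          · exact Or.inr ⟨j', List.mem_cons_of_mem j h1, h2, h3⟩
        · rintro (hx | ⟨j', h1, h2, h3⟩)
          · exact Or.inl (Or.inl hx)
          · rcases List.mem_cons.mp h1 with rfl | h1
            · exact Or.inl (Or.inr h3.symm)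
            · exact Or.inr ⟨j', h1, h2, h3⟩
    · rw [if_neg hm] at h
      rw [PySem.List.pyGetD_natCast] at hm
      rw [ih _ _ h x]
      simp only [List.mem_cons]
      constructor
      · rintro (hx | ⟨j', h1, h2⟩)
        · exact Or.inl hx
        · exact Or.inr ⟨j', Or.inr h1, h2⟩
      · rintro (hx | ⟨j', h1, h2⟩)
        · exact Or.inl hx
        · rcases h1 with rfl | h1
          · exact absurd h2.1 hm
          · exact Or.inr ⟨j', h1, h2⟩

-- a length j is "active for prefix p" iff 0 < j < n and needle.take j is a suffix of p
theorem pvScan_iff (needle : List String) (n : Nat) (hn : n = needle.length) (hpos : 0 < n) :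
    ∀ (hs : List String) (states : List Nat) (p : List String),
      (∀ j, j ∈ states ↔ (0 < j ∧ j < n ∧ needle.take j <:+ p)) →
      (pvScan needle n hs states = true ↔
        ∃ q, q ≠ [] ∧ q <+: hs ∧ needle <:+ p ++ q) := by
  intro hs
  induction hs with
  | nil =>
    intro states p hinv
    simp only [pvScan]
    refine iff_of_false (by simp) ?_
    rintro ⟨q, hq, hpre, _⟩
    exact hq (List.prefix_nil.mp hpre)
  | cons tok hs' ih =>
    intro states p hinv
    -- membership in 0 :: states ↔ partial-match suffix (including j = 0)
    have hmem : ∀ j, j ∈ (0 :: states) ↔ (j < n ∧ needle.take j <:+ p) := by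
      intro j
      simp only [List.mem_cons, hinv]
      constructor
      · rintro (rfl | ⟨h1, h2, h3⟩)
        · exact ⟨hpos, by simp⟩
        · exact ⟨h2, h3⟩
      · rintro ⟨h1, h2⟩
        rcases Nat.eq_zero_or_pos j with rfl | hj
        · exact Or.inl rfl
        · exact Or.inr ⟨hj, h1, h2⟩
    simp only [pvScan]
    cases hstep : pvStep needle n tok (0 :: states) [] with
    | none =>
      simp only [true_iff]
      obtain ⟨j, hjs, hjt, hjn⟩ := (pvStep_none_iff needle n tok (0 :: states) []).mp hstep
      obtain ⟨hjlt, hjsuf⟩ := (hmem j).mp hjs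
      have : needle.take (j + 1) <:+ p ++ [tok] :=
        (take_succ_suffix needle p tok j (by omega)).mpr ⟨hjsuf, hjt⟩
      rw [hjn, hn, List.take_length] at this
      exact ⟨[tok], by simp, ⟨hs', rfl⟩, this⟩
    | some new =>
      have hnofull : ¬ ∃ j ∈ (0 :: states), needle.getD j "" = tok ∧ j + 1 = n := by
        intro hc
        rw [← pvStep_none_iff needle n tok (0 :: states) []] at hc
        rw [hstep] at hc
        exact absurd hc (by simp)
      have hinv' : ∀ j, j ∈ new ↔ (0 < j ∧ j < n ∧ needle.take j <:+ p ++ [tok]) := by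
        intro j
        rw [pvStep_some_mem needle n tok (0 :: states) [] new hstep j]
        simp only [List.mem_nil_iff, false_or]
        constructor
        · rintro ⟨j', hj', ht, rfl⟩
          obtain ⟨hlt, hsuf⟩ := (hmem j').mp hj'
          have hlt' : j' + 1 < n := by
            rcases Nat.lt_or_ge (j' + 1) n with h | h
            · exact h
            · exact absurd ⟨j', hj', ht, by omega⟩ hnofull
          exact ⟨by omega, hlt',
            (take_succ_suffix needle p tok j' (by omega)).mpr ⟨hsuf, ht⟩⟩
        · rintro ⟨h0, hlt, hsuf⟩
          obtain ⟨j', rfl⟩ : ∃ j', j = j' + 1 := ⟨j - 1, by omega⟩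
          obtain ⟨hs1, hs2⟩ := (take_succ_suffix needle p tok j' (by omega)).mp hsuf
          exact ⟨j', (hmem j').mpr ⟨by omega, hs1⟩, hs2, rfl⟩
      rw [ih new (p ++ [tok]) hinv']
      constructor
      · rintro ⟨q, hq, hpre, hsuf⟩
        refine ⟨tok :: q, by simp, ?_, by simpa using hsuf⟩
        obtain ⟨t, ht⟩ := hpre
        exact ⟨t, by simp [← ht]⟩
      · rintro ⟨q, hq, hpre, hsuf⟩
        cases q with
        | nil => exact absurd rfl hq
        | cons a q' =>
          obtain ⟨heq, hpre'⟩ := List.cons_prefix_cons.mp hpre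
          cases q' with
          | nil =>
            -- the match ends exactly at tok: contradicts hnofull
            exfalso
            have hfull : needle <:+ p ++ [tok] := by rw [← heq]; simpa using hsuf
            have hne : needle ≠ [] := by
              intro hc; rw [hc] at hn; simp at hn; omega
            have hdl : needle.dropLast ++ [needle.getLast hne] = needle :=
              List.dropLast_append_getLast hne
            rw [← hdl, pvConcatSuffix] at hfull
            obtain ⟨hlt, hsfx⟩ := hfull
            apply hnofull
            refine ⟨n - 1, ?_, ?_, by omega⟩
            · rw [hmem]
              refine ⟨by omega, ?_⟩
              have htk : needle.take (n - 1) = needle.dropLast := by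
                rw [List.dropLast_eq_take, ← hn]
              rw [htk]; exact hsfx
            · have h1 : needle.getD (n - 1) "" = needle.getLast hne := by
                rw [List.getD_eq_getElem _ "" (by omega), List.getLast_eq_getElem]
                simp [hn]
              rw [h1, hlt]
          | cons b q'' =>
            refine ⟨b :: q'', by simp, hpre', ?_⟩
            rw [heq] at hsuf
            simpa [List.append_assoc] using hsuf

theorem alt_iff (needle haystack : List String) :
    tokens_contiguous_subphrase_alt needle haystack = true ↔
      needle ≠ [] ∧ needle <:+: haystack := by
  unfold tokens_contiguous_subphrase_alt
  by_cases h : needle.length = 0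
  · rw [if_pos h]
    refine iff_of_false (by simp) ?_
    rintro ⟨hne, _⟩
    exact hne (List.length_eq_zero_iff.mp h)
  · rw [if_neg h]
    have hne : needle ≠ [] := fun hc => h (by rw [hc]; rfl)
    rw [pvScan_iff needle needle.length rfl (by omega) haystack [] []
      (by
        intro j
        constructor
        · intro hc; simp at hc
        · rintro ⟨h0, hlt, hsfx⟩
          exfalso
          have hl := List.suffix_nil.mp hsfx
          have hlen := congrArg List.length hl
          rw [List.length_take] at hlen
          simp only [List.length_nil] at hlen
          omega)]
    constructor
    · rintro ⟨q, hq, hpre, hsuf⟩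
      refine ⟨hne, ?_⟩
      simp only [List.nil_append] at hsuf
      exact hsuf.isInfix.trans hpre.isInfix
    · rintro ⟨_, s, t, hst⟩
      refine ⟨s ++ needle, ?_, ⟨t, by rw [← hst, List.append_assoc]⟩, by simp⟩
      intro hc
      have := congrArg List.length hc
      simp at this
      exact hne this.2

-- ===== VERDICT (by name: the statement is the Claim_ definition above) =====
theorem tokens_contiguous_subphrase_spec : Claim_equal_tokens_contiguous_subphrase := by
  intro needle haystack _
  unfold Spec_tokens_contiguous_subphrase
  cases hA : tokens_contiguous_subphrase needle haystack with
  | true =>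
    exact ((alt_iff needle haystack).mpr ((a_iff needle haystack).mp hA)).symm
  | false =>
    cases hB : tokens_contiguous_subphrase_alt needle haystack with
    | true =>
      have h2 := (a_iff needle haystack).mpr ((alt_iff needle haystack).mp hB)
      rw [hA] at h2
      exact absurd h2 (by simp)
    | false => rfl
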